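-- pv_equiv track=rewrite | github.com/EugeneGouws/TimePyBling | core/cost_function.py | _max_window_coeff
-- ===== SOURCE A (Python) =====
-- _PASSES   = [(2, 3), (3, 2), (4, 1)]
--
-- def _max_window_coeff(max_day: int) -> int:
--     """Return the maximum per-day window coefficient across all days.
--
--     For day *d* in a schedule spanning [0, max_day], the coefficient is the
--     number of (weighted) convolution windows that contain *d*.  The hottest
--     day is near the centre of the range.
--     """
--     if max_day < 0:
--         return 1
--     best = 0
--     for d in range(max_day + 1):
--         total = 0
--         for w_size, w_weight in _PASSES:
--             upper = max_day - w_size + 1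
--             if upper < 0:
--                 continue
--             lo = max(0, d - w_size + 1)
--             hi = min(d, upper)
--             count = hi - lo + 1 if hi >= lo else 0
--             total += w_weight * count
--         if total > best:
--             best = total
--     return best if best else 1
-- ===== SOURCE B (Python) =====
-- _PASSES = [(2, 3), (3, 2), (4, 1)]
--
-- def _max_window_coeff(max_day: int) -> int:
--     """Breakpoint evaluation: total(d) is a sum of trapezoidal (concave,
--     piecewise-linear) count functions, so its maximum over [0, max_day] is
--     attained at one of the finitely many breakpoints -- O(1) instead of
--     scanning every day."""
--     if max_day < 0:
--         return 1
--
--     def total(d):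
--         s = 0
--         for w, wt in _PASSES:
--             upper = max_day - w + 1
--             if upper >= 0:
--                 s += wt * max(0, min(d, upper) - max(0, d - w + 1) + 1)
--         return s
--
--     def clamp(x):
--         return min(max(x, 0), max_day)
--
--     cands = [0] + [clamp(b) for w, _ in _PASSES for b in (w - 1, max_day - w + 1)]
--     best = max(total(d) for d in cands)
--     return best if best > 0 else 1
-- ===== Notes on version B (the rewrite author's own statement) =====
-- stated objective: faster
-- what changed: Instead of scanning every day d in [0, max_day] (O(max_day)), B evaluates the sum of trapezoidal window-count functions only at the O(1) clamped breakpoints of the passes (w-1 and max_day-w+1) and takes the max there.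
import Mathlib
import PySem

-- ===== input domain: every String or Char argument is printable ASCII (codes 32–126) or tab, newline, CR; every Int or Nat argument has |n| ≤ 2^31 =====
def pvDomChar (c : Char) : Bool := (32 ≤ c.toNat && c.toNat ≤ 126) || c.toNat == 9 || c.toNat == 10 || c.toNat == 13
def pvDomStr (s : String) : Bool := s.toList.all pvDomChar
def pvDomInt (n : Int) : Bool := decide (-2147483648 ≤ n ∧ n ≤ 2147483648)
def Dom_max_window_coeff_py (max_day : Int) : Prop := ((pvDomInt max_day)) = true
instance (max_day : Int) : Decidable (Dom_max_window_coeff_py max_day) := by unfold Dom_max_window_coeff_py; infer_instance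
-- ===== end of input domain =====

-- B evaluates the sum of trapezoidal window-count functions only at its O(1) breakpoints
-- instead of scanning every day of [0, max_day] (asymptotically faster).

def pvPasses : List (Int × Int) := [(2, 3), (3, 2), (4, 1)]

-- ===== PORT A =====
-- the inner 'for w_size, w_weight in _PASSES' loop of A
def pvTotalA (max_day d : Int) : Int :=
  pvPasses.foldl (fun total p =>
    let upper := max_day - p.1 + 1
    if upper < 0 then total
    else
      let lo := max 0 (d - p.1 + 1)
      let hi := min d upper
      let count := if hi ≥ lo then hi - lo + 1 else 0
      total + p.2 * count) 0

def max_window_coeff_py (max_day : Int) : Int :=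
  if max_day < 0 then 1
  else
    let best := (PySem.List.pyRange 0 (max_day + 1) 1).foldl
      (fun best d =>
        let total := pvTotalA max_day d
        if total > best then total else best) 0
    if best ≠ 0 then best else 1

-- ===== PORT B =====
-- B's helper 'total'
def pvTotalB (max_day d : Int) : Int :=
  pvPasses.foldl (fun s p =>
    let upper := max_day - p.1 + 1
    if upper ≥ 0 then s + p.2 * max 0 (min d upper - max 0 (d - p.1 + 1) + 1)
    else s) 0

-- B's helper 'clamp'
def pvClampB (max_day x : Int) : Int := min (max x 0) max_day

def max_window_coeff_py_alt (max_day : Int) : Int :=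
  if max_day < 0 then 1
  else
    -- cands = [0] + [clamp(b) for w, _ in _PASSES for b in (w-1, max_day-w+1)]
    let rest := pvPasses.flatMap (fun p =>
      [pvClampB max_day (p.1 - 1), pvClampB max_day (max_day - p.1 + 1)])
    -- max(total(d) for d in cands): first element is total 0, then fold max over the rest
    let best := rest.foldl (fun b d => max b (pvTotalB max_day d)) (pvTotalB max_day 0)
    if best > 0 then best else 1

-- ===== PRECONDITION & SPEC =====
def Spec_max_window_coeff_py (max_day : Int) (out : Int) : Prop := out = max_window_coeff_py_alt max_day
instance (max_day : Int) (out : Int) : Decidable (Spec_max_window_coeff_py max_day out) := by unfold Spec_max_window_coeff_py; infer_instance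

-- ===== CLAIM (what is proved, stated in full; the proofs are below) =====
def Claim_equal_max_window_coeff_py : Prop := ∀ (max_day : Int), Dom_max_window_coeff_py max_day → Spec_max_window_coeff_py max_day (max_window_coeff_py max_day)

-- ===== LEMMAS AND PROOFS =====

-- A's update 'if total > best then total else best' is a max
theorem pv_if_gt_eq_max (b t : Int) : (if t > b then t else b) = max b t := by
  split_ifs <;> omega

-- fold of max is bounded by c when the seed and every g d are
theorem pv_foldl_max_le (g : Int → Int) (l : List Int) (b c : Int)
    (hb : b ≤ c) (h : ∀ d ∈ l, g d ≤ c) :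
    l.foldl (fun b d => max b (g d)) b ≤ c := by
  induction l generalizing b with
  | nil => simpa using hb
  | cons a l ih =>
    simp only [List.foldl_cons]
    exact ih _ (by have := h a (by simp); omega) (fun d hd => h d (by simp [hd]))

-- the seed is ≤ the fold of max
theorem pv_le_foldl_max_seed (g : Int → Int) (l : List Int) (b : Int) :
    b ≤ l.foldl (fun b d => max b (g d)) b := by
  induction l generalizing b with
  | nil => simp
  | cons a l ih =>
    simp only [List.foldl_cons]
    exact le_trans (le_max_left _ _) (ih _)

-- any member's g-value is ≤ the fold of max
theorem pv_le_foldl_max (g : Int → Int) (l : List Int) (b d : Int) (hd : d ∈ l) :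
    g d ≤ l.foldl (fun b d => max b (g d)) b := by
  induction l generalizing b with
  | nil => simp at hd
  | cons a l ih =>
    simp only [List.foldl_cons]
    rcases List.mem_cons.mp hd with h | h
    · subst h; exact le_trans (le_max_right _ _) (pv_le_foldl_max_seed ..)
    · exact ih _ h

theorem pv_totalA_le (max_day d : Int) : pvTotalA max_day d ≤ 16 := by
  simp only [pvTotalA, pvPasses, List.foldl_cons, List.foldl_nil]
  split_ifs <;> omega

theorem pv_totalB_le (max_day d : Int) : pvTotalB max_day d ≤ 16 := by
  simp only [pvTotalB, pvPasses, List.foldl_cons, List.foldl_nil]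
  split_ifs <;> omega

theorem pv_totalA_three (max_day : Int) (h : 7 ≤ max_day) : pvTotalA max_day 3 = 16 := by
  simp only [pvTotalA, pvPasses, List.foldl_cons, List.foldl_nil]
  split_ifs <;> omega

theorem pv_totalB_three (max_day : Int) (h : 7 ≤ max_day) : pvTotalB max_day 3 = 16 := by
  simp only [pvTotalB, pvPasses, List.foldl_cons, List.foldl_nil]
  split_ifs <;> omega

-- A returns 16 for every max_day ≥ 7
theorem pv_A_large (max_day : Int) (h : 7 ≤ max_day) : max_window_coeff_py max_day = 16 := by
  have hneg : ¬ max_day < 0 := by omega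
  simp only [max_window_coeff_py, if_neg hneg]
  have hstep : (fun (best d : Int) =>
      let total := pvTotalA max_day d
      if total > best then total else best) = fun b d => max b (pvTotalA max_day d) := by
    funext b d; exact pv_if_gt_eq_max b (pvTotalA max_day d)
  rw [hstep]
  have hmem : (3 : Int) ∈ PySem.List.pyRange 0 (max_day + 1) 1 := by
    rw [PySem.List.mem_pyRange_one]; omega
  have h1 : (PySem.List.pyRange 0 (max_day + 1) 1).foldl
      (fun b d => max b (pvTotalA max_day d)) 0 ≤ 16 :=
    pv_foldl_max_le _ _ _ _ (by omega) (fun d _ => pv_totalA_le max_day d)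
  have h2 : (16 : Int) ≤ (PySem.List.pyRange 0 (max_day + 1) 1).foldl
      (fun b d => max b (pvTotalA max_day d)) 0 := by
    have := pv_le_foldl_max (pvTotalA max_day) (PySem.List.pyRange 0 (max_day + 1) 1) 0 3 hmem
    rwa [pv_totalA_three max_day h] at this
  have hbest : (PySem.List.pyRange 0 (max_day + 1) 1).foldl
      (fun b d => max b (pvTotalA max_day d)) 0 = 16 := le_antisymm h1 h2
  simp [hbest]

-- B returns 16 for every max_day ≥ 7
theorem pv_B_large (max_day : Int) (h : 7 ≤ max_day) : max_window_coeff_py_alt max_day = 16 := by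
  have hneg : ¬ max_day < 0 := by omega
  simp only [max_window_coeff_py_alt, if_neg hneg]
  have hrest : pvPasses.flatMap (fun p =>
      [pvClampB max_day (p.1 - 1), pvClampB max_day (max_day - p.1 + 1)]) =
      [pvClampB max_day 1, pvClampB max_day (max_day - 1), pvClampB max_day 2,
       pvClampB max_day (max_day - 2), pvClampB max_day 3, pvClampB max_day (max_day - 3)] := by
    simp only [pvPasses, List.flatMap_cons, List.flatMap_nil, List.append_nil,
      List.cons_append, List.nil_append, List.cons.injEq, and_true]
    norm_num
    refine ⟨?_, ?_, ?_⟩ <;> (simp only [pvClampB]; omega)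
  rw [hrest]
  have hc3 : pvClampB max_day 3 = 3 := by simp only [pvClampB]; omega
  have h1 : _ ≤ (16 : Int) :=
    pv_foldl_max_le (pvTotalB max_day) [pvClampB max_day 1, pvClampB max_day (max_day - 1),
      pvClampB max_day 2, pvClampB max_day (max_day - 2), pvClampB max_day 3,
      pvClampB max_day (max_day - 3)] (pvTotalB max_day 0) 16
      (pv_totalB_le max_day 0) (fun d _ => pv_totalB_le max_day d)
  have hmem : (3 : Int) ∈ [pvClampB max_day 1, pvClampB max_day (max_day - 1),
      pvClampB max_day 2, pvClampB max_day (max_day - 2), pvClampB max_day 3,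
      pvClampB max_day (max_day - 3)] := by
    simp only [List.mem_cons, List.not_mem_nil, or_false]
    exact Or.inr (Or.inr (Or.inr (Or.inr (Or.inl hc3.symm))))
  have h2 := pv_le_foldl_max (pvTotalB max_day) _ (pvTotalB max_day 0) 3 hmem
  rw [pv_totalB_three max_day h] at h2
  have hbest := le_antisymm h1 h2
  simp [hbest]

-- ===== VERDICT (by name: the statement is the Claim_ definition above) =====
theorem max_window_coeff_py_spec : Claim_equal_max_window_coeff_py := by
  intro max_day _
  unfold Spec_max_window_coeff_py
  by_cases hneg : max_day < 0
  · simp [max_window_coeff_py, max_window_coeff_py_alt, hneg]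
  · by_cases hbig : 7 ≤ max_day
    · rw [pv_A_large max_day hbig, pv_B_large max_day hbig]
    · have h0 : 0 ≤ max_day := by omega
      have h6 : max_day ≤ 6 := by omega
      interval_cases max_day <;> decide
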